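-- pv_equiv track=rewrite | github.com/SpaceWha1e/practice_2 | practice_2/7.py | three_min
-- ===== SOURCE A (Python) =====
-- def three_min(A):
--     mins = [[100 for i in range(3)], [0 for i in range(3)]]
--     for i in range(0, len(A)):
--         if A[i] < mins[0][2]:
--             if A[i] >= mins[0][1]:
--                 mins[0][2] = A[i]
--                 mins[1][2] = i
--             elif A[i] >= mins[0][0]:
--                 mins[0][2] = mins[0][1]
--                 mins[1][2] = mins[1][1]
--                 mins[0][1] = A[i]
--                 mins[1][1] = i
--             elif A[i] < mins[0][0]:
--                 mins[0][2] = mins[0][1]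
--                 mins[1][2] = mins[1][1]
--                 mins[0][1] = mins[0][0]
--                 mins[1][1] = mins[1][0]
--                 mins[0][0] = A[i]
--                 mins[1][0] = i
--     return mins
-- ===== SOURCE B (Python) =====
-- def three_min(A):
--     cands = sorted((v, i) for i, v in enumerate(A) if v < 100)
--     top3 = (cands[:3] + [(100, 0)] * 3)[:3]
--     return [[v for v, _ in top3], [i for _, i in top3]]
-- ===== Notes on version B (the rewrite author's own statement) =====
-- stated objective: simpler
-- what changed: Replaces A's single-pass hand-rolled three-slot running selection (nested shift/insert branches on a mutated 2x3 list) by a declarative pipeline: filter the candidate (value, index) pairs below the sentinel, sort them stably (value-then-index), and take the first three padded with the sentinel pair.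
import Mathlib
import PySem

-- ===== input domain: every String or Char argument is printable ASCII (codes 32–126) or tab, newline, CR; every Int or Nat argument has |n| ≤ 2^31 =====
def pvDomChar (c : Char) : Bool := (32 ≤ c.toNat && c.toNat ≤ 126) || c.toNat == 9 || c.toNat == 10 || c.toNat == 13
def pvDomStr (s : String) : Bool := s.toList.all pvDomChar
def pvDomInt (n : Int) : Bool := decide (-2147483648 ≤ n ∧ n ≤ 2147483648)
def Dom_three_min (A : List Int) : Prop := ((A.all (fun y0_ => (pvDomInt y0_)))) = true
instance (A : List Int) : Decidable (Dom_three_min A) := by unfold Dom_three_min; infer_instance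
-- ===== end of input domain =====

-- B replaces A's hand-rolled running three-slot selection by filter + sort + take-3 (simpler, not faster).


-- ===== PORT A =====
-- A mutates a 2×3 list-of-lists `mins`; it is carried here as a pair of Int triples
-- ((mins[0][0],mins[0][1],mins[0][2]), (mins[1][0],mins[1][1],mins[1][2])), updated with exactly
-- the Python branches; `for i in range(0, len(A)) … A[i]` iterates the pairs (i, A[i]) (enumerate).
def three_min_step (mins : (Int × Int × Int) × (Int × Int × Int)) (p : Int × Int) :
    (Int × Int × Int) × (Int × Int × Int) :=
  match mins, p with
  | ((m0, m1, m2), (j0, j1, j2)), (i, x) =>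
    if x < m2 then
      if x ≥ m1 then ((m0, m1, x), (j0, j1, i))
      else if x ≥ m0 then ((m0, x, m1), (j0, i, j1))
      else if x < m0 then ((x, m0, m1), (i, j0, j1))
      else ((m0, m1, m2), (j0, j1, j2))
    else ((m0, m1, m2), (j0, j1, j2))

def three_min (A : List Int) : List (List Int) :=
  let mins := (PySem.List.enumerate A 0).foldl three_min_step ((100, 100, 100), (0, 0, 0))
  [[mins.1.1, mins.1.2.1, mins.1.2.2], [mins.2.1, mins.2.2.1, mins.2.2.2]]

-- ===== PORT B =====
-- cands = sorted((v, i) for i, v in enumerate(A) if v < 100)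
def three_min_cands (A : List Int) : List (Int × Int) :=
  ((PySem.List.enumerate A 0).filter (fun p => p.2 < 100)).map (fun p => (p.2, p.1))

def three_min_alt (A : List Int) : List (List Int) :=
  let cands := PySem.List.sorted2 (three_min_cands A) (fun q => q.1) (fun q => q.2) false
  let top3 := (cands.take 3 ++ List.replicate 3 ((100 : Int), (0 : Int))).take 3
  [top3.map (fun q => q.1), top3.map (fun q => q.2)]

-- ===== PRECONDITION & SPEC =====
def Spec_three_min (A : List Int) (out : List (List Int)) : Prop := out = three_min_alt A
instance (A : List Int) (out : List (List Int)) : Decidable (Spec_three_min A out) := by unfold Spec_three_min; infer_instance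

-- ===== CLAIM (what is proved, stated in full; the proofs are below) =====
def Claim_equal_three_min : Prop := ∀ (A : List Int), Dom_three_min A → Spec_three_min A (three_min A)

-- ===== LEMMAS AND PROOFS =====

-- the comparator sorted2 uses for keys (·.1), (·.2), reverse = false
def pvLt (a b : Int × Int) : Bool :=
  decide (a.1 < b.1) || (!decide (b.1 < a.1) && decide (a.2 < b.2))

lemma sorted2_eq_foldl (xs : List (Int × Int)) :
    PySem.List.sorted2 xs (fun q => q.1) (fun q => q.2) false =
      xs.foldl (fun acc x => PySem.List.insertBy pvLt x acc) [] := rfl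

-- A's three-slot state read off the (sorted) candidate list: slot k is the k-th pair, padded by (100,0)
def pvEnc : List (Int × Int) → (Int × Int × Int) × (Int × Int × Int)
  | [] => ((100, 100, 100), (0, 0, 0))
  | [a] => ((a.1, 100, 100), (a.2, 0, 0))
  | [a, b] => ((a.1, b.1, 100), (a.2, b.2, 0))
  | a :: b :: c :: _ => ((a.1, b.1, c.1), (a.2, b.2, c.2))

lemma pairwise_insertBy (x : Int × Int) (L : List (Int × Int))
    (hs : L.Pairwise (fun a b => a.1 ≤ b.1)) :
    (PySem.List.insertBy pvLt x L).Pairwise (fun a b => a.1 ≤ b.1) := by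
  induction L with
  | nil => simp [PySem.List.insertBy]
  | cons y ys ih =>
    rw [List.pairwise_cons] at hs
    obtain ⟨hy, hys⟩ := hs
    simp only [PySem.List.insertBy]
    split_ifs with h
    · refine List.Pairwise.cons ?_ (List.Pairwise.cons hy hys)
      intro z hz
      rcases List.mem_cons.mp hz with rfl | hz
      · simp only [pvLt, Bool.or_eq_true, Bool.and_eq_true, Bool.not_eq_true',
          decide_eq_true_eq, decide_eq_false_iff_not] at h
        rcases h with h | ⟨h, _⟩ <;> omega
      · simp only [pvLt, Bool.or_eq_true, Bool.and_eq_true, Bool.not_eq_true',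
          decide_eq_true_eq, decide_eq_false_iff_not] at h
        have hyz := hy z hz
        rcases h with h | ⟨h, _⟩ <;> omega
    · refine List.Pairwise.cons ?_ (ih hys)
      intro z hz
      rcases (PySem.List.mem_insertBy pvLt x z ys).mp hz with rfl | hz
      · simp only [pvLt, Bool.or_eq_true, Bool.and_eq_true, Bool.not_eq_true',
          decide_eq_true_eq, decide_eq_false_iff_not, not_or, not_and] at h
        omega
      · exact hy z hz

-- one loop step of A equals (conditional) ordered insertion on the B side
set_option maxHeartbeats 1000000 in
lemma step_enc (L : List (Int × Int)) (s x : Int)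
    (hv : ∀ p ∈ L, p.1 < 100) (hi : ∀ p ∈ L, p.2 < s)
    (hs : L.Pairwise (fun a b => a.1 ≤ b.1)) :
    three_min_step (pvEnc L) (s, x) =
      pvEnc (if x < 100 then PySem.List.insertBy pvLt (x, s) L else L) := by
  by_cases hx : x < 100
  · rw [if_pos hx]
    match L with
    | [] =>
      simp only [pvEnc, PySem.List.insertBy, three_min_step]
      split_ifs <;> first | rfl | omega
    | [a] =>
      have ha := hv a (by simp); have ha' := hi a (by simp)
      simp only [pvEnc, PySem.List.insertBy, three_min_step, pvLt,
        decide_eq_true_eq, Bool.or_eq_true, Bool.and_eq_true, Bool.not_eq_true',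
        decide_eq_false_iff_not]
      split_ifs <;> first | rfl | omega
    | [a, b] =>
      have ha := hv a (by simp); have ha' := hi a (by simp)
      have hb := hv b (by simp); have hb' := hi b (by simp)
      have hab : a.1 ≤ b.1 := by
        rw [List.pairwise_cons] at hs; exact hs.1 b (by simp)
      simp only [pvEnc, PySem.List.insertBy, three_min_step, pvLt,
        decide_eq_true_eq, Bool.or_eq_true, Bool.and_eq_true, Bool.not_eq_true',
        decide_eq_false_iff_not]
      split_ifs <;> first | rfl | omega
    | a :: b :: c :: t =>
      have ha := hv a (by simp); have ha' := hi a (by simp)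
      have hb := hv b (by simp); have hb' := hi b (by simp)
      have hc := hv c (by simp); have hc' := hi c (by simp)
      have hab : a.1 ≤ b.1 := by
        rw [List.pairwise_cons] at hs; exact hs.1 b (by simp)
      have hbc : b.1 ≤ c.1 := by
        rw [List.pairwise_cons, List.pairwise_cons] at hs; exact hs.2.1 c (by simp)
      simp only [pvEnc, PySem.List.insertBy, three_min_step, pvLt,
        decide_eq_true_eq, Bool.or_eq_true, Bool.and_eq_true, Bool.not_eq_true',
        decide_eq_false_iff_not]
      split_ifs <;> first | rfl | omega
  · rw [if_neg hx]
    match L with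
    | [] =>
      simp only [pvEnc, three_min_step]
      split_ifs
      rfl
    | [a] =>
      have ha := hv a (by simp)
      simp only [pvEnc, three_min_step]
      split_ifs
      rfl
    | [a, b] =>
      have hb := hv b (by simp)
      simp only [pvEnc, three_min_step]
      split_ifs
      rfl
    | a :: b :: c :: t =>
      have hc := hv c (by simp)
      simp only [pvEnc, three_min_step]
      split_ifs <;> first | rfl | omega

-- the whole loop: A's fold over enumerate = B's insertion fold over the filtered, swapped pairs
lemma loop_enc (A : List Int) (s : Int) (L : List (Int × Int))
    (hv : ∀ p ∈ L, p.1 < 100) (hi : ∀ p ∈ L, p.2 < s)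
    (hs : L.Pairwise (fun a b => a.1 ≤ b.1)) :
    (PySem.List.enumerate A s).foldl three_min_step (pvEnc L) =
      pvEnc ((((PySem.List.enumerate A s).filter (fun p => p.2 < 100)).map
          (fun p => (p.2, p.1))).foldl (fun acc x => PySem.List.insertBy pvLt x acc) L) := by
  induction A generalizing s L with
  | nil => simp [PySem.List.enumerate]
  | cons x A ih =>
    rw [PySem.List.enumerate_cons]
    simp only [List.foldl_cons, List.filter_cons]
    rw [step_enc L s x hv hi hs]
    by_cases hx : x < 100
    · rw [if_pos hx, if_pos (show (decide ((s, x).2 < 100)) = true by simpa using hx)]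
      simp only [List.map_cons, List.foldl_cons]
      exact ih (s + 1) _
        (by intro p hp
            rcases (PySem.List.mem_insertBy pvLt (x, s) p L).mp hp with rfl | hp
            · exact hx
            · exact hv p hp)
        (by intro p hp
            rcases (PySem.List.mem_insertBy pvLt (x, s) p L).mp hp with rfl | hp
            · omega
            · have := hi p hp; omega)
        (pairwise_insertBy _ _ hs)
    · rw [if_neg hx, if_neg (show ¬ (decide ((s, x).2 < 100)) = true by simpa using hx)]
      exact ih (s + 1) L hv (by intro p hp; have := hi p hp; omega) hs

-- reading the padded take-3 off a list is reading pvEnc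
lemma take3_pad (S : List (Int × Int)) :
    [((S.take 3 ++ List.replicate 3 ((100 : Int), (0 : Int))).take 3).map (fun q => q.1),
     ((S.take 3 ++ List.replicate 3 ((100 : Int), (0 : Int))).take 3).map (fun q => q.2)] =
      [[(pvEnc S).1.1, (pvEnc S).1.2.1, (pvEnc S).1.2.2],
       [(pvEnc S).2.1, (pvEnc S).2.2.1, (pvEnc S).2.2.2]] := by
  match S with
  | [] => rfl
  | [a] => rfl
  | [a, b] => rfl
  | a :: b :: c :: t => simp [pvEnc, List.take]

-- ===== VERDICT (by name: the statement is the Claim_ definition above) =====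
theorem three_min_spec : Claim_equal_three_min := by
  intro A _
  unfold Spec_three_min three_min three_min_alt three_min_cands
  rw [sorted2_eq_foldl]
  have h0 : ((100, 100, 100), (0, 0, 0)) = pvEnc [] := rfl
  rw [h0, loop_enc A 0 [] (by simp) (by simp) (by simp)]
  rw [take3_pad]
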